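-- pv_equiv track=rewrite | github.com/iu7og/iu7games | games/woodcutter/woodcutter_runner.py | make_move
-- ===== SOURCE A (Python) =====
-- from dataclasses import dataclass
--
-- @dataclass
-- class Woodcutter:
--     """
--         Константы игры woodcutter.
--     """
--
--     max_count_nodes = 20
--     min_count_nodes = 10
--
--     connected = 1
--     not_connected = 0
--
--     player_one_win = 1
--     player_two_win = 2
--
--     spaces = 30
--
-- def delete_node(node, tree, size):
--     """
--         Удаление вершины в дереве.
--     """
--
--     for i in range(size):
--         tree[i][node] = Woodcutter.not_connected
--         tree[node][i] = Woodcutter.not_connected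
--
-- def bfs(node, tree, size):
--     """
--         Поиск в ширину в дереве.
--     """
--
--     distances = [-1] * size
--     distances[node] = 0
--
--     queue = [node]
--     qstart = 0
--
--     while qstart < len(queue):
--         top = queue[qstart]
--         qstart += 1
--
--         for i in range(size):
--             if tree[top][i] and distances[i] == -1:
--                 distances[i] = distances[top] + 1
--                 queue.append(i)
--
--     return distances
--
-- def connected_with_root(node, tree, size):
--     """
--         Функция проверки вершины:
--         соединена ли вершина с корнем.
--     """
--
--     distances = bfs(node, tree, size)
--
--     for i in range(size):
--         if tree[i][i] or distances[i]:
--             return True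
--
--     return False
--
-- def make_move(tree, move, size):
--     """
--         Ход игрока.
--     """
--
--     row_move = move // size
--     column_move = move % size
--
--     tree[row_move][column_move] = Woodcutter.not_connected
--     tree[column_move][row_move] = Woodcutter.not_connected
--
--     for i in range(size):
--         if not connected_with_root(i, tree, size):
--             delete_node(i, tree, size)
--
--     return tree
-- ===== SOURCE B (Python) =====
-- def make_move(tree, move, size):
--     """Player's move: cut the edge (row, column) of the adjacency matrix.
--
--     The original's pruning pass is a no-op: `connected_with_root` is always
--     True for size >= 2 (distances are 0 only at the start node and truthy
--     elsewhere), and for size == 1 `delete_node` only rewrites the already-zero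
--     cell.  So the move is just the two symmetric cell clears.
--     """
--     row_move, column_move = divmod(move, size)
--     tree[row_move][column_move] = 0
--     tree[column_move][row_move] = 0
--     return tree
-- ===== Notes on version B (the rewrite author's own statement) =====
-- stated objective: faster
-- what changed: B drops the whole BFS-based pruning pass, which is provably a no-op (connected_with_root is always True for size>=2 and delete_node only rewrites an already-zero cell for size==1), and just clears the two symmetric matrix cells with divmod.
import Mathlib
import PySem

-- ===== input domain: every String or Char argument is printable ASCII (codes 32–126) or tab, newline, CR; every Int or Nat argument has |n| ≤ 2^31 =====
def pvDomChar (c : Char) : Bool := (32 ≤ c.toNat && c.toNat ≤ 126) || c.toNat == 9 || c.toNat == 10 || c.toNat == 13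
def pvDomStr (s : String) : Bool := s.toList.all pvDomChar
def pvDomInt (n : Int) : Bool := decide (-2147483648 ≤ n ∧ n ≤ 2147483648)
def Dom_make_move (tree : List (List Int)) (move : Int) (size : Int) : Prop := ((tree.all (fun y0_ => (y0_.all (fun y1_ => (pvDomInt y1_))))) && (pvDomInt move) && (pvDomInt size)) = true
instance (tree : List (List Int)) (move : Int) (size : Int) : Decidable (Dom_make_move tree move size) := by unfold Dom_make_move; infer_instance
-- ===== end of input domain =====

-- B drops A's whole BFS pruning pass (proved below to be a no-op) and just clears the two
-- symmetric cells; both Pythons mutate `tree` in place the same way, the claim is about the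
-- return value.

-- ===== PORT A =====
-- delete_node: 'for i in range(size): tree[i][node] = 0; tree[node][i] = 0'
def delete_node (node : Int) (tree : List (List Int)) (size : Int) : List (List Int) :=
  (PySem.List.pyRange 0 size 1).foldl (fun t i =>
    let t := PySem.List.pySetD t i (PySem.List.pySetD (PySem.List.pyGetD t i []) node 0)
    PySem.List.pySetD t node (PySem.List.pySetD (PySem.List.pyGetD t node []) i 0)) tree

-- the body of bfs's while loop: 'for i in range(size): if tree[top][i] and distances[i] == -1: …';
-- state = (distances, queue); all indexing is in range under Pre_, so the pyGetD/pySetD defaults are unreachable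
def bfsScan (tree : List (List Int)) (size top : Int) (st : List Int × List Int) : List Int × List Int :=
  (PySem.List.pyRange 0 size 1).foldl (fun st i =>
    if PySem.List.pyGetD (PySem.List.pyGetD tree top []) i 0 ≠ 0 ∧ PySem.List.pyGetD st.1 i 0 = -1 then
      (PySem.List.pySetD st.1 i (PySem.List.pyGetD st.1 top 0 + 1), st.2 ++ [i])
    else st) st

-- 'while qstart < len(queue): …' as fuel recursion; the guard only makes the recursion total:
-- under Pre_ the queue holds at most size distinct members of range(size), so fuel = size.toNat
-- (supplied by bfs below) is never exhausted and the loop ends exactly as Python's does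
def bfsLoop (tree : List (List Int)) (size : Int) : Nat → List Int → Int → List Int → List Int
  | 0, _queue, _qstart, dist => dist
  | fuel+1, queue, qstart, dist =>
    if qstart < (queue.length : Int) then
      let top := PySem.List.pyGetD queue qstart 0
      let st := bfsScan tree size top (dist, queue)
      bfsLoop tree size fuel st.2 (qstart + 1) st.1
    else dist

def bfs (node : Int) (tree : List (List Int)) (size : Int) : List Int :=
  let distances := PySem.List.pySetD (List.replicate size.toNat (-1)) node 0
  bfsLoop tree size size.toNat [node] 0 distances

-- 'for i in range(size): if tree[i][i] or distances[i]: return True' / 'return False'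
def connected_with_root (node : Int) (tree : List (List Int)) (size : Int) : Bool :=
  let distances := bfs node tree size
  (PySem.List.pyRange 0 size 1).any (fun i =>
    (PySem.List.pyGetD (PySem.List.pyGetD tree i []) i 0 != 0) ||
    (PySem.List.pyGetD distances i 0 != 0))

def make_move (tree : List (List Int)) (move : Int) (size : Int) : List (List Int) :=
  let row_move := PySem.Int.floordiv move size
  let column_move := PySem.Int.mod move size
  let tree := PySem.List.pySetD tree row_move
    (PySem.List.pySetD (PySem.List.pyGetD tree row_move []) column_move 0)
  let tree := PySem.List.pySetD tree column_move
    (PySem.List.pySetD (PySem.List.pyGetD tree column_move []) row_move 0)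
  (PySem.List.pyRange 0 size 1).foldl (fun t i =>
    if connected_with_root i t size then t else delete_node i t size) tree

-- ===== PORT B =====
def make_move_alt (tree : List (List Int)) (move : Int) (size : Int) : List (List Int) :=
  match PySem.Int.divmod? move size with
  | none => tree   -- size = 0: Python raises ZeroDivisionError, excluded by Pre_
  | some (row_move, column_move) =>
    let tree := PySem.List.pySetD tree row_move
      (PySem.List.pySetD (PySem.List.pyGetD tree row_move []) column_move 0)
    PySem.List.pySetD tree column_move
      (PySem.List.pySetD (PySem.List.pyGetD tree column_move []) row_move 0)

-- ===== PRECONDITION & SPEC =====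
-- Exactly where A returns normally: size ≠ 0 (else ZeroDivisionError), the two written cells
-- tree[move//size][move%size] and tree[move%size][move//size] exist under Python indexing
-- (else IndexError), and, when size ≥ 1 (the pruning loop runs), the first size rows exist and
-- have at least size entries each (the BFS reads tree[top][i] for all top, i in range(size)).
def Pre_make_move (tree : List (List Int)) (move : Int) (size : Int) : Prop :=
  size ≠ 0 ∧
  PySem.Raise.InRange tree.length (PySem.Int.floordiv move size) ∧
  PySem.Raise.InRange (PySem.List.pyGetD tree (PySem.Int.floordiv move size) []).length (PySem.Int.mod move size) ∧
  PySem.Raise.InRange tree.length (PySem.Int.mod move size) ∧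
  PySem.Raise.InRange (PySem.List.pyGetD tree (PySem.Int.mod move size) []).length (PySem.Int.floordiv move size) ∧
  (1 ≤ size → size ≤ (tree.length : Int) ∧ ∀ row ∈ tree.take size.toNat, size ≤ (row.length : Int))
instance (tree : List (List Int)) (move : Int) (size : Int) : Decidable (Pre_make_move tree move size) := by unfold Pre_make_move PySem.Raise.InRange; infer_instance

def pvWitness_make_move : List (List Int) × Int × Int := ([[0, 1], [1, 0]], 1, 2)

def Spec_make_move (tree : List (List Int)) (move : Int) (size : Int) (out : List (List Int)) : Prop := out = make_move_alt tree move size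
instance (tree : List (List Int)) (move : Int) (size : Int) (out : List (List Int)) : Decidable (Spec_make_move tree move size out) := by unfold Spec_make_move; infer_instance

-- ===== CLAIM (what is proved, stated in full; the proofs are below) =====
def Claim_equal_make_move : Prop := ∀ (tree : List (List Int)) (move : Int) (size : Int), Dom_make_move tree move size → Pre_make_move tree move size → Spec_make_move tree move size (make_move tree move size)

-- ===== LEMMAS AND PROOFS =====

-- invariant of bfs's state for a start node with canonical (non-negative) index n0 < size:
-- distances has length size, entries ≥ -1, the entry 0 occurs only at position n0, and every
-- queued node is in range(size) with a distance already set (≠ -1)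
def BfsInv (size : Int) (n0 : Nat) (st : List Int × List Int) : Prop :=
  st.1.length = size.toNat ∧
  (∀ v ∈ st.1, -1 ≤ v) ∧
  (∀ j : Nat, (hj : j < st.1.length) → st.1[j] = 0 → j = n0) ∧
  (∀ x ∈ st.2, 0 ≤ x ∧ x < size ∧ PySem.List.pyGetD st.1 x 0 ≠ -1)

-- one iteration of bfsScan's fold preserves the invariant (and the dequeued node keeps its distance)
lemma bfsStep_inv (tree : List (List Int)) (size top i : Int) (n0 : Nat)
    (st : List Int × List Int)
    (hinv : BfsInv size n0 st) (htop0 : 0 ≤ top) (htops : top < size)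
    (htop : PySem.List.pyGetD st.1 top 0 ≠ -1)
    (hi0 : 0 ≤ i) (his : i < size) :
    let st' := if PySem.List.pyGetD (PySem.List.pyGetD tree top []) i 0 ≠ 0 ∧ PySem.List.pyGetD st.1 i 0 = -1 then
      (PySem.List.pySetD st.1 i (PySem.List.pyGetD st.1 top 0 + 1), st.2 ++ [i])
    else st
    BfsInv size n0 st' ∧ PySem.List.pyGetD st'.1 top 0 ≠ -1 := by
  intro st'
  obtain ⟨hlen, hge, hzero, hq⟩ := hinv
  by_cases hc : PySem.List.pyGetD (PySem.List.pyGetD tree top []) i 0 ≠ 0 ∧ PySem.List.pyGetD st.1 i 0 = -1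
  · simp only [st', if_pos hc]
    obtain ⟨-, hguard⟩ := hc
    have htoplt : top < (st.1.length : Int) := by rw [hlen]; omega
    have hilt : i < (st.1.length : Int) := by rw [hlen]; omega
    have hgtop := PySem.List.pyGetD_eq_getElem st.1 0 htop0 htoplt
    have hgi := PySem.List.pyGetD_eq_getElem st.1 0 hi0 hilt
    rw [hgi] at hguard
    have htopge : (0:Int) ≤ st.1[top.toNat] := by
      have hmem : st.1[top.toNat] ∈ st.1 := List.getElem_mem (by omega)
      have := hge _ hmem
      rw [hgtop] at htop
      omega
    have hne : i.toNat ≠ top.toNat := by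
      intro h
      simp only [h] at hguard
      rw [hgtop, hguard] at htop
      exact htop rfl
    set v : Int := PySem.List.pyGetD st.1 top 0 + 1 with hv
    have hvpos : 1 ≤ v := by rw [hv, hgtop]; omega
    rw [PySem.List.pySetD_of_nonneg st.1 v hi0]
    have hitn : i.toNat < st.1.length := by omega
    refine ⟨⟨by simpa using hlen, ?_, ?_, ?_⟩, ?_⟩
    · intro w hw
      rcases List.mem_or_eq_of_mem_set hw with h | h
      · exact hge w h
      · omega
    · intro j hj hj0
      simp only [List.length_set] at hj
      rw [List.getElem_set] at hj0
      by_cases hji : i.toNat = j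
      · rw [if_pos hji] at hj0; omega
      · rw [if_neg hji] at hj0
        exact hzero j hj hj0
    · intro x hx
      rcases List.mem_append.1 hx with h | h
      · obtain ⟨hx0, hxs, hxd⟩ := hq x h
        refine ⟨hx0, hxs, ?_⟩
        have hxlt : x < (st.1.length : Int) := by rw [hlen]; omega
        rw [PySem.List.pyGetD_eq_getElem _ 0 hx0 hxlt] at hxd
        have hxne : i.toNat ≠ x.toNat := by
          intro hcon
          simp only [← hcon] at hxd
          exact hxd hguard
        rw [PySem.List.pyGetD_eq_getElem _ 0 hx0 (by simpa using hxlt),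
            List.getElem_set, if_neg hxne]
        exact hxd
      · simp only [List.mem_singleton] at h
        subst h
        refine ⟨hi0, his, ?_⟩
        rw [PySem.List.pyGetD_eq_getElem _ 0 hi0 (by simpa using hilt),
            List.getElem_set, if_pos rfl]
        omega
    · rw [PySem.List.pyGetD_eq_getElem _ 0 htop0 (by simpa using htoplt),
          List.getElem_set, if_neg hne, ← hgtop]
      exact htop
  · simp only [st', if_neg hc]
    exact ⟨⟨hlen, hge, hzero, hq⟩, htop⟩

lemma bfsScan_inv (tree : List (List Int)) (size top : Int) (n0 : Nat)
    (st : List Int × List Int) (hinv : BfsInv size n0 st)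
    (htop0 : 0 ≤ top) (htops : top < size) (htop : PySem.List.pyGetD st.1 top 0 ≠ -1) :
    BfsInv size n0 (bfsScan tree size top st) ∧
      PySem.List.pyGetD (bfsScan tree size top st).1 top 0 ≠ -1 := by
  unfold bfsScan
  have h : ∀ l : List Int, (∀ i ∈ l, 0 ≤ i ∧ i < size) → ∀ st,
      BfsInv size n0 st → PySem.List.pyGetD st.1 top 0 ≠ -1 →
      BfsInv size n0 (l.foldl (fun st i =>
        if PySem.List.pyGetD (PySem.List.pyGetD tree top []) i 0 ≠ 0 ∧ PySem.List.pyGetD st.1 i 0 = -1 then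
          (PySem.List.pySetD st.1 i (PySem.List.pyGetD st.1 top 0 + 1), st.2 ++ [i])
        else st) st) ∧
      PySem.List.pyGetD ((l.foldl (fun st i =>
        if PySem.List.pyGetD (PySem.List.pyGetD tree top []) i 0 ≠ 0 ∧ PySem.List.pyGetD st.1 i 0 = -1 then
          (PySem.List.pySetD st.1 i (PySem.List.pyGetD st.1 top 0 + 1), st.2 ++ [i])
        else st) st)).1 top 0 ≠ -1 := by
    intro l
    induction l with
    | nil => intro _ st h1 h2; exact ⟨h1, h2⟩
    | cons x xs ih =>
      intro hb st h1 h2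
      obtain ⟨hx0, hxs⟩ := hb x List.mem_cons_self
      have hstep := bfsStep_inv tree size top x n0 st h1 htop0 htops h2 hx0 hxs
      simp only [List.foldl_cons]
      exact ih (fun i hi => hb i (List.mem_cons_of_mem _ hi)) _ hstep.1 hstep.2
  exact h _ (fun i hi => (PySem.List.mem_pyRange_one.1 hi)) st hinv htop

lemma bfsLoop_inv (tree : List (List Int)) (size : Int) (n0 : Nat) :
    ∀ (fuel : Nat) (queue : List Int) (qstart : Int) (dist : List Int),
    BfsInv size n0 (dist, queue) → 0 ≤ qstart →
    (bfsLoop tree size fuel queue qstart dist).length = size.toNat ∧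
    (∀ j : Nat, (hj : j < (bfsLoop tree size fuel queue qstart dist).length) →
      (bfsLoop tree size fuel queue qstart dist)[j] = 0 → j = n0) := by
  intro fuel
  induction fuel with
  | zero =>
    intro queue qstart dist hinv _
    exact ⟨hinv.1, hinv.2.2.1⟩
  | succ fuel ih =>
    intro queue qstart dist hinv hq0
    by_cases hlt : qstart < (queue.length : Int)
    · have htopmem : PySem.List.pyGetD queue qstart 0 ∈ queue :=
        PySem.List.pyGetD_mem queue 0 ⟨by omega, hlt⟩
      obtain ⟨ht0, hts, htd⟩ := hinv.2.2.2 _ htopmem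
      have hscan := bfsScan_inv tree size _ n0 (dist, queue) hinv ht0 hts htd
      have heq : bfsLoop tree size (fuel+1) queue qstart dist =
          bfsLoop tree size fuel (bfsScan tree size (PySem.List.pyGetD queue qstart 0) (dist, queue)).2
            (qstart + 1) (bfsScan tree size (PySem.List.pyGetD queue qstart 0) (dist, queue)).1 := by
        simp only [bfsLoop, if_pos hlt]
      rw [heq]
      exact ih _ _ _ (by simpa using hscan.1) (by omega)
    · have heq : bfsLoop tree size (fuel+1) queue qstart dist = dist := by
        simp only [bfsLoop, if_neg hlt]
      rw [heq]
      exact ⟨hinv.1, hinv.2.2.1⟩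

-- whatever the tree, bfs's distances have length size and value 0 exactly at the start node
lemma bfs_zero_unique (node : Int) (tree : List (List Int)) (size : Int)
    (h0 : 0 ≤ node) (hs : node < size) :
    (bfs node tree size).length = size.toNat ∧
    (∀ j : Nat, (hj : j < (bfs node tree size).length) →
      (bfs node tree size)[j] = 0 → j = node.toNat) := by
  have hnn : node.toNat < size.toNat := by omega
  have hd0 : PySem.List.pySetD (List.replicate size.toNat (-1)) node 0 =
      (List.replicate size.toNat (-1 : Int)).set node.toNat 0 :=
    PySem.List.pySetD_of_nonneg _ _ h0
  have hinv : BfsInv size node.toNat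
      ((List.replicate size.toNat (-1 : Int)).set node.toNat 0, [node]) := by
    refine ⟨by simp, ?_, ?_, ?_⟩
    · intro v hv
      rcases List.mem_or_eq_of_mem_set hv with h | h
      · rw [List.eq_of_mem_replicate h]
      · omega
    · intro j hj hj0
      simp only [List.length_set, List.length_replicate] at hj
      rw [List.getElem_set] at hj0
      by_cases hji : node.toNat = j
      · omega
      · rw [if_neg hji, List.getElem_replicate] at hj0
        omega
    · intro x hx
      simp only [List.mem_singleton] at hx
      subst hx
      refine ⟨h0, hs, ?_⟩
      rw [PySem.List.pyGetD_eq_getElem _ 0 h0 (by simp; omega),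
          List.getElem_set, if_pos rfl]
      omega
  have := bfsLoop_inv tree size node.toNat size.toNat [node] 0
    ((List.replicate size.toNat (-1 : Int)).set node.toNat 0) hinv le_rfl
  unfold bfs
  rw [hd0]
  exact this

-- the heart of the rewrite: for size ≥ 2 the connectivity test is True on EVERY tree,
-- because among indices 0 and 1 at least one differs from the start node and its distance
-- is -1 or ≥ 1, hence truthy
lemma cwr_true (node : Int) (tree : List (List Int)) (size : Int)
    (hsize : 2 ≤ size) (h0 : 0 ≤ node) (hs : node < size) :
    connected_with_root node tree size = true := by
  obtain ⟨hlen, huniq⟩ := bfs_zero_unique node tree size h0 hs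
  unfold connected_with_root
  rw [List.any_eq_true]
  refine ⟨if node.toNat = 0 then 1 else 0, ?_, ?_⟩
  · rw [PySem.List.mem_pyRange_one]
    split <;> omega
  · rw [Bool.or_eq_true, bne_iff_ne, bne_iff_ne]
    right
    have hj0 : (0:Int) ≤ (if node.toNat = 0 then 1 else 0) := by split <;> omega
    have hjlt : (if node.toNat = 0 then (1:Int) else 0) < ((bfs node tree size).length : Int) := by
      rw [hlen]; split <;> omega
    rw [PySem.List.pyGetD_eq_getElem _ 0 hj0 hjlt]
    intro hzero
    have := huniq _ (by omega) hzero
    split at this <;> simp_all <;> omega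

lemma foldl_id {α β : Type} (f : α → β → α) (l : List β)
    (h : ∀ a, ∀ b ∈ l, f a b = a) : ∀ a, l.foldl f a = a := by
  intro a
  induction l generalizing a with
  | nil => rfl
  | cons x xs ih =>
    simp only [List.foldl_cons, h a x (List.mem_cons_self)]
    exact ih (fun a b hb => h a b (List.mem_cons_of_mem _ hb)) a

-- size = 1: bfs from node 0 returns [0], so the connectivity test is just 'tree[0][0] != 0'
lemma scan1 (t : List (List Int)) : bfsScan t 1 0 ([0], [0]) = ([0], [0]) := by
  unfold bfsScan
  rw [show PySem.List.pyRange 0 1 1 = [0] from rfl]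
  simp

lemma bfs1 (t : List (List Int)) : bfs 0 t 1 = [0] := by
  unfold bfs
  rw [show PySem.List.pySetD (List.replicate (1:Int).toNat (-1:Int)) 0 0 = [0] from rfl,
      show (1:Int).toNat = 1 from rfl]
  unfold bfsLoop
  rw [if_pos (by norm_num : (0:Int) < (([0] : List Int).length : Int))]
  simp only [show PySem.List.pyGetD [(0:Int)] 0 0 = 0 from rfl, scan1]
  rfl

lemma cwr1 (t : List (List Int)) : connected_with_root 0 t 1 =
    (PySem.List.pyGetD (PySem.List.pyGetD t 0 []) 0 0 != 0) := by
  unfold connected_with_root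
  rw [bfs1, show PySem.List.pyRange 0 1 1 = [0] from rfl]
  simp

-- writing tree[0][0] = 0 when that cell already reads 0 changes nothing
lemma set00_id (t : List (List Int)) (hv : PySem.List.pyGetD (PySem.List.pyGetD t 0 []) 0 0 = 0) :
    PySem.List.pySetD t 0 (PySem.List.pySetD (PySem.List.pyGetD t 0 []) 0 0) = t := by
  cases t with
  | nil => rfl
  | cons r rs =>
    have hr : PySem.List.pyGetD (r::rs) 0 [] = r := by simp [pysem]
    rw [hr]
    rw [hr] at hv
    cases r with
    | nil =>
      rw [PySem.List.pySetD_of_nonneg _ _ le_rfl, PySem.List.pySetD_of_nonneg _ _ le_rfl]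
      rfl
    | cons x xs =>
      have hx : PySem.List.pyGetD (x::xs) 0 0 = x := by simp [pysem]
      rw [hx] at hv
      subst hv
      rw [PySem.List.pySetD_of_nonneg _ _ le_rfl, PySem.List.pySetD_of_nonneg _ _ le_rfl]
      rfl

lemma delete1_id (t : List (List Int)) (hv : PySem.List.pyGetD (PySem.List.pyGetD t 0 []) 0 0 = 0) :
    delete_node 0 t 1 = t := by
  unfold delete_node
  rw [show PySem.List.pyRange 0 1 1 = [0] from rfl]
  simp only [List.foldl_cons, List.foldl_nil, set00_id t hv]

-- the single pruning iteration at size = 1 is the identity: either the cell is truthy (no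
-- delete) or it is already 0 and delete_node rewrites it with 0
lemma fold1_id (t : List (List Int)) :
    (if connected_with_root 0 t 1 then t else delete_node 0 t 1) = t := by
  rw [cwr1]
  by_cases hv : PySem.List.pyGetD (PySem.List.pyGetD t 0 []) 0 0 = 0
  · simp [hv, delete1_id t hv]
  · simp [hv]

-- ===== VERDICT (by name: the statement is the Claim_ definition above) =====
theorem make_move_spec : Claim_equal_make_move := by
  intro tree move size _hdom hpre
  -- only size ≠ 0 is needed for the equality; the remaining conjuncts delimit where A raises
  obtain ⟨hsz, -, -, -, -, -⟩ := hpre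
  unfold Spec_make_move
  have halt : make_move_alt tree move size =
      (let tree' := PySem.List.pySetD tree (PySem.Int.floordiv move size)
        (PySem.List.pySetD (PySem.List.pyGetD tree (PySem.Int.floordiv move size) []) (PySem.Int.mod move size) 0)
      PySem.List.pySetD tree' (PySem.Int.mod move size)
        (PySem.List.pySetD (PySem.List.pyGetD tree' (PySem.Int.mod move size) []) (PySem.Int.floordiv move size) 0)) := by
    unfold make_move_alt PySem.Int.divmod?
    rw [if_neg hsz]
    rfl
  rw [halt]
  unfold make_move
  by_cases h2 : 2 ≤ size
  · -- size ≥ 2: connected_with_root is always true, so the pruning fold is the identity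
    exact foldl_id _ _ (fun t i hi => by
      have hb := PySem.List.mem_pyRange_one.1 hi
      rw [if_pos (cwr_true i t size h2 hb.1 hb.2)]) _
  · by_cases h1 : size = 1
    · subst h1
      rw [show PySem.List.pyRange 0 1 1 = [0] from rfl]
      simp only [List.foldl_cons, List.foldl_nil, fold1_id]
    · -- size ≤ -1: range(size) is empty, the pruning loop never runs
      rw [PySem.List.pyRange_one_eq_nil (by omega : size ≤ 0)]
      rfl
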